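-- pv_equiv track=rewrite | github.com/FedericoGerminario/Data-Science-Lab | lab3.1/apriori.py | pruneCandidates
-- ===== SOURCE A (Python) =====
-- def pruneCandidates(Ck, Lnk):
--     C = []
--     flag = 0
--     for i in range(len(Ck)):
--         for j in range(len(Lnk)):
--             lenght = 0
--             for n in (Ck[i]):
--                 if n in Lnk[j]:
--                     lenght += 1
--
--             if lenght == len(Lnk[j]):
--                 lenght = 0
--                 flag = 1
--                 break
--             else:
--                 lenght = 0
--
--         if flag != 1:
--             C.append(Ck[i])
--
--         else:
--             flag = 0
--
--     return C
-- ===== SOURCE B (Python) =====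
-- def pruneCandidates(Ck, Lnk):
--     # Sieve: loop over Lnk outermost, progressively filtering the surviving
--     # candidates; each frequent itemset's members go into a hash set once.
--     survivors = list(Ck)
--     for L in Lnk:
--         sL = set(L)
--         m = len(L)
--         survivors = [c for c in survivors if sum(1 for n in c if n in sL) != m]
--     return survivors
-- ===== Notes on version B (the rewrite author's own statement) =====
-- stated objective: faster
-- what changed: B inverts the loop order into a progressive sieve: it iterates over Lnk once, turning each frequent itemset into a hash set, and filters the surviving candidate list at each step, replacing A's per-candidate flag/break scan whose 'n in Lnk[j]' is a linear list scan.
import Mathlib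
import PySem

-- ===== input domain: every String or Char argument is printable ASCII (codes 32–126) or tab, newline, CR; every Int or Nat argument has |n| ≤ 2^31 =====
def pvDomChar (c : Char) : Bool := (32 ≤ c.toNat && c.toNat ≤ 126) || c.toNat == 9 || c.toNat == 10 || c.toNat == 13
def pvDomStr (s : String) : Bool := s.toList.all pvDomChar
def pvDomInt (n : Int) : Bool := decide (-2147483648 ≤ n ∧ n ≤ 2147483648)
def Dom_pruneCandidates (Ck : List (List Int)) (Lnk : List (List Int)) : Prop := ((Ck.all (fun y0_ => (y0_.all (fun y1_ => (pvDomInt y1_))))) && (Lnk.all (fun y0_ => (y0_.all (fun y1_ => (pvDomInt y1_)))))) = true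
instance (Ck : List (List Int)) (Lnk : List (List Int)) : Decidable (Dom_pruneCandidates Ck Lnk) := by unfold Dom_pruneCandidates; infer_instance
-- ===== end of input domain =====

-- B replaces A's per-candidate flag/break scan by a progressive sieve over Lnk
-- (each frequent itemset becomes a hash set once, filtering the survivor list);
-- same return value, different loop structure.

-- ===== PORT A =====
-- inner 'for n in Ck[i]: if n in Lnk[j]: lenght += 1'
def pvCountA (c : List Int) (L : List Int) : Int :=
  c.foldl (fun acc n => if n ∈ L then acc + 1 else acc) 0

-- middle 'for j in range(len(Lnk)) … break' — returns the flag after the loop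
def pvFlagA (c : List Int) (Ls : List (List Int)) : Bool :=
  match Ls with
  | [] => false
  | L :: rest => if pvCountA c L = (L.length : Int) then true else pvFlagA c rest

def pruneCandidates (Ck : List (List Int)) (Lnk : List (List Int)) : List (List Int) :=
  Ck.foldl (fun C c => if pvFlagA c Lnk then C else C ++ [c]) []

-- ===== PORT B =====
-- 'sum(1 for n in c if n in sL)'
def pvCountB (c : List Int) (sL : PySem.Set Int) : Int :=
  c.foldl (fun acc n => if n ∈ sL then acc + 1 else acc) 0

def pruneCandidates_alt (Ck : List (List Int)) (Lnk : List (List Int)) : List (List Int) :=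
  Lnk.foldl (fun surv L =>
    let sL := PySem.Set.ofList L
    surv.filter (fun c => pvCountB c sL != (L.length : Int))) Ck

-- ===== PRECONDITION & SPEC =====
def Spec_pruneCandidates (Ck : List (List Int)) (Lnk : List (List Int)) (out : List (List Int)) : Prop := out = pruneCandidates_alt Ck Lnk
instance (Ck : List (List Int)) (Lnk : List (List Int)) (out : List (List Int)) : Decidable (Spec_pruneCandidates Ck Lnk out) := by unfold Spec_pruneCandidates; infer_instance

-- ===== CLAIM (what is proved, stated in full; the proofs are below) =====
def Claim_equal_pruneCandidates : Prop := ∀ (Ck : List (List Int)) (Lnk : List (List Int)), Dom_pruneCandidates Ck Lnk → Spec_pruneCandidates Ck Lnk (pruneCandidates Ck Lnk)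

-- ===== LEMMAS AND PROOFS =====

theorem pvCountB_eq (c L : List Int) : pvCountB c (PySem.Set.ofList L) = pvCountA c L := by
  unfold pvCountA pvCountB
  simp only [PySem.Set.mem_ofList]

theorem not_any_eq_all (c : List Int) (Ls : List (List Int)) :
    (!(Ls.any (fun L => decide (pvCountA c L = (L.length : Int)))))
      = Ls.all (fun L => pvCountB c (PySem.Set.ofList L) != (L.length : Int)) := by
  induction Ls with
  | nil => rfl
  | cons L rest ih =>
      simp only [List.any_cons, List.all_cons, Bool.not_or, ih, pvCountB_eq, bne]
      by_cases h : pvCountA c L = (L.length : Int) <;> simp [h]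

theorem pvFlagA_eq_any (c : List Int) (Ls : List (List Int)) :
    pvFlagA c Ls = Ls.any (fun L => decide (pvCountA c L = (L.length : Int))) := by
  induction Ls with
  | nil => rfl
  | cons L rest ih =>
      simp only [pvFlagA, List.any_cons, ← ih]
      by_cases h : pvCountA c L = (L.length : Int) <;> simp [h]

theorem foldl_append_if (p : List Int → Bool) (l : List (List Int)) (acc : List (List Int)) :
    l.foldl (fun C c => if p c then C else C ++ [c]) acc
      = acc ++ l.filter (fun c => !p c) := by
  induction l generalizing acc with
  | nil => simp
  | cons c rest ih =>
      by_cases h : p c = true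
      · simp [List.foldl_cons, h, ih]
      · simp only [Bool.not_eq_true] at h
        simp [List.foldl_cons, h, ih]

theorem foldl_filter_eq_filter_all (q : List Int → List Int → Bool)
    (Ls : List (List Int)) (Ck : List (List Int)) :
    Ls.foldl (fun surv L => surv.filter (fun c => q c L)) Ck
      = Ck.filter (fun c => Ls.all (fun L => q c L)) := by
  induction Ls generalizing Ck with
  | nil => simp
  | cons L rest ih =>
      simp only [List.foldl_cons, ih, List.filter_filter, List.all_cons]
      apply List.filter_congr
      intro c _
      by_cases h : q c L = true <;> simp [h]

-- ===== VERDICT (by name: the statement is the Claim_ definition above) =====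
theorem pruneCandidates_spec : Claim_equal_pruneCandidates := by
  intro Ck Lnk _
  unfold Spec_pruneCandidates pruneCandidates pruneCandidates_alt
  rw [foldl_append_if, foldl_filter_eq_filter_all]
  simp only [List.nil_append]
  apply List.filter_congr
  intro c _
  rw [pvFlagA_eq_any, not_any_eq_all]
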